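-- pv_equiv track=rewrite | github.com/C0pyBara/BetterExperimentAmpere | Data_collector.py | extract_true_coords_from_headers
-- ===== SOURCE A (Python) =====
-- from typing import Any, Dict, List, Tuple, Optional
--
-- def extract_true_coords_from_headers(headers: List[Any]) -> List[Dict[str, int]]:
--     coords = set()
--     for h in headers or []:
--         if isinstance(h, dict) and "row" in h and "col" in h:
--             try:
--                 coords.add((int(h["row"]), int(h["col"])))
--             except Exception:
--                 continue
--     return [{"row": r, "col": c} for r, c in sorted(coords)]
-- ===== SOURCE B (Python) =====
-- from typing import Any, Dict, List
--
-- def extract_true_coords_from_headers(headers: List[Any]) -> List[Dict[str, int]]: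
--     # Maintain acc as an already-sorted, duplicate-free list of (row, col)
--     # tuples by inserting each new tuple at its sorted position (skipping it
--     # if already present) -- no set, no final sort.
--     acc = []
--     for h in headers or []:
--         if isinstance(h, dict) and "row" in h and "col" in h:
--             try:
--                 t = (int(h["row"]), int(h["col"]))
--             except Exception:
--                 continue
--             i = 0
--             while i < len(acc) and acc[i] < t:
--                 i += 1
--             if i == len(acc) or acc[i] != t:
--                 acc.insert(i, t)
--     return [{"row": r, "col": c} for r, c in acc]
-- ===== Notes on version B (the rewrite author's own statement) =====
-- stated objective: alternative
-- what changed: Instead of deduplicating through a hash set and sorting at the end, B maintains a sorted duplicate-free accumulator throughout, inserting each (row, col) tuple at its sorted position (skipped when already present), so no set and no final sort are used.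
import Mathlib
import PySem

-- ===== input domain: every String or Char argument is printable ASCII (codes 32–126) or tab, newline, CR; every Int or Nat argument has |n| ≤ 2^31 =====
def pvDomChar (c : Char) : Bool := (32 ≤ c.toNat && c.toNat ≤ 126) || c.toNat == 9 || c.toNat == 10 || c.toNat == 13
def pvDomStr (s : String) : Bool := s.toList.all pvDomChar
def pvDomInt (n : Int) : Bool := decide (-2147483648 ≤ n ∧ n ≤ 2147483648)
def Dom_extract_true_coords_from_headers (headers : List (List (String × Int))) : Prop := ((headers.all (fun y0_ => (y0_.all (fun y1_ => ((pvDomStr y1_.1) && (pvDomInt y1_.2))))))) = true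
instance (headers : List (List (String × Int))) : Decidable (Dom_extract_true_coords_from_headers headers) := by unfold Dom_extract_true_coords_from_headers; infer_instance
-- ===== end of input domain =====

-- B keeps a sorted duplicate-free accumulator by sorted-position insertion instead of
-- A's hash-set-then-sort; identical output ("alternative", not faster).

-- ===== PORT A =====
-- the guard '"row" in h and "col" in h' followed by int(h["row"]), int(h["col"])
-- (int() on an int is the identity; on typed inputs the try/except never fires).
def pvKey? (h : List (String × Int)) : Option (Int × Int) :=
  match PySem.Dict.get? ⟨h⟩ "row", PySem.Dict.get? ⟨h⟩ "col" with
  | some r, some c => some (r, c)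
  | _, _ => none

-- 'headers or []' iterates [] when headers is empty — same iteration as headers itself.
def extract_true_coords_from_headers (headers : List (List (String × Int))) : List (List (String × Int)) :=
  (PySem.List.sorted2
      (headers.foldl (fun (s : PySem.Set (Int × Int)) h =>
        match pvKey? h with
        | some t => PySem.Set.add s t
        | none => s) PySem.Set.empty)
      Prod.fst Prod.snd).map (fun t => [("row", t.1), ("col", t.2)])

-- ===== PORT B =====
-- Python's tuple '<' on (Int × Int), as used by 'acc[i] < t'.
def pltB (p q : Int × Int) : Bool :=
  decide (p.1 < q.1) || (!decide (q.1 < p.1) && decide (p.2 < q.2))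

-- B's while/insert body: walk past smaller elements, skip an equal one, else insert here.
def insUnique (t : Int × Int) : List (Int × Int) → List (Int × Int)
  | [] => [t]
  | x :: xs => if pltB x t then x :: insUnique t xs else if x = t then x :: xs else t :: x :: xs

def extract_true_coords_from_headers_alt (headers : List (List (String × Int))) : List (List (String × Int)) :=
  (headers.foldl (fun (acc : List (Int × Int)) h =>
      match PySem.Dict.get? ⟨h⟩ "row", PySem.Dict.get? ⟨h⟩ "col" with
      | some r, some c => insUnique (r, c) acc
      | _, _ => acc) []).map (fun t => [("row", t.1), ("col", t.2)])

-- ===== PRECONDITION & SPEC =====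
def Spec_extract_true_coords_from_headers (headers : List (List (String × Int))) (out : List (List (String × Int))) : Prop := out = extract_true_coords_from_headers_alt headers
instance (headers : List (List (String × Int))) (out : List (List (String × Int))) : Decidable (Spec_extract_true_coords_from_headers headers out) := by unfold Spec_extract_true_coords_from_headers; infer_instance

-- ===== CLAIM (what is proved, stated in full; the proofs are below) =====
def Claim_equal_extract_true_coords_from_headers : Prop := ∀ (headers : List (List (String × Int))), Dom_extract_true_coords_from_headers headers → Spec_extract_true_coords_from_headers headers (extract_true_coords_from_headers headers)

-- ===== LEMMAS AND PROOFS =====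

def pltP (p q : Int × Int) : Prop := pltB p q = true
def pleP (p q : Int × Int) : Prop := pltB q p = false

lemma plt_iff (p q : Int × Int) : pltP p q ↔ (p.1 < q.1 ∨ (p.1 = q.1 ∧ p.2 < q.2)) := by
  simp only [pltP, pltB, Bool.or_eq_true, Bool.and_eq_true, Bool.not_eq_true',
    decide_eq_true_eq, decide_eq_false_iff_not]
  omega

lemma ple_iff (p q : Int × Int) : pleP p q ↔ (p.1 < q.1 ∨ (p.1 = q.1 ∧ p.2 ≤ q.2)) := by
  have h : pleP p q ↔ ¬ pltP q p := by simp [pleP, pltP]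
  rw [h, plt_iff]
  omega

lemma ple_of_plt {p q : Int × Int} (h : pltP p q) : pleP p q := by
  rw [plt_iff] at h; rw [ple_iff]; omega

lemma ple_of_not_plt {p q : Int × Int} (h : pltB p q = false) : pleP q p := h

lemma ple_trans {p q r : Int × Int} (h1 : pleP p q) (h2 : pleP q r) : pleP p r := by
  rw [ple_iff] at *; omega

lemma plt_of_ple_ne {p q : Int × Int} (h : pleP p q) (hne : p ≠ q) : pltP p q := by
  rw [ple_iff] at h; rw [plt_iff]
  rcases p with ⟨a, b⟩; rcases q with ⟨c, d⟩
  have hne' : ¬(a = c ∧ b = d) := fun hc => hne (by simp [hc.1, hc.2])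
  simp only at h ⊢
  omega

lemma plt_asymm {p q : Int × Int} (h1 : pltP p q) (h2 : pltP q p) : False := by
  rw [plt_iff] at h1 h2; omega

lemma plt_irrefl (p : Int × Int) : ¬ pltP p p := by rw [plt_iff]; omega

lemma plt_trans {p q r : Int × Int} (h1 : pltP p q) (h2 : pltP q r) : pltP p r := by
  rw [plt_iff] at *; omega

lemma eq_of_not_plt {p q : Int × Int} (h1 : ¬ pltP p q) (h2 : p ≠ q) : pltP q p := by
  rw [plt_iff] at *
  rcases p with ⟨a, b⟩; rcases q with ⟨c, d⟩
  have : ¬(a = c ∧ b = d) := fun hc => h2 (by simp [hc.1, hc.2])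
  simp only at *
  omega

-- insertBy with Python's tuple '<' preserves sortedness (≤ pairwise).
lemma insertBy_pairwise (x : Int × Int) :
    ∀ (ys : List (Int × Int)), ys.Pairwise pleP →
      (PySem.List.insertBy pltB x ys).Pairwise pleP := by
  intro ys
  induction ys with
  | nil => intro _; simp [PySem.List.insertBy]
  | cons y ys ih =>
    intro hp
    rw [List.pairwise_cons] at hp
    obtain ⟨hy, hys⟩ := hp
    show (if pltB x y = true then x :: y :: ys else y :: PySem.List.insertBy pltB x ys).Pairwise pleP
    split_ifs with h
    · refine List.Pairwise.cons ?_ (List.Pairwise.cons hy hys)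
      intro z hz
      rcases List.mem_cons.mp hz with rfl | hz
      · exact ple_of_plt h
      · exact ple_trans (ple_of_plt h) (hy z hz)
    · refine List.Pairwise.cons ?_ (ih hys)
      intro z hz
      rcases (PySem.List.mem_insertBy pltB x z ys).mp hz with rfl | hz
      · exact ple_of_not_plt (Bool.not_eq_true _ ▸ h)
      · exact hy z hz

lemma foldl_insertBy_pairwise (l : List (Int × Int)) :
    ∀ acc : List (Int × Int), acc.Pairwise pleP →
      (l.foldl (fun a x => PySem.List.insertBy pltB x a) acc).Pairwise pleP := by
  induction l with
  | nil => intro acc h; exact h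
  | cons x l ih => intro acc h; exact ih _ (insertBy_pairwise x acc h)

lemma sorted2_pairwise (xs : List (Int × Int)) :
    (PySem.List.sorted2 xs Prod.fst Prod.snd).Pairwise pleP := by
  exact foldl_insertBy_pairwise xs [] List.Pairwise.nil

-- A's collection loop is Set.ofList of the tuple list filterMap'd out of headers.
def pvTs (headers : List (List (String × Int))) : List (Int × Int) :=
  headers.filterMap pvKey?

lemma foldA_eq (l : List (List (String × Int))) :
    ∀ s : List (Int × Int),
      l.foldl (fun s h => match pvKey? h with
        | some t => PySem.Set.add s t
        | none => s) s = (pvTs l).foldl PySem.Set.add s := by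
  induction l with
  | nil => intro s; rfl
  | cons h l ih =>
    intro s
    simp only [List.foldl_cons, pvTs, List.filterMap_cons]
    cases hk : pvKey? h with
    | none => simpa [pvTs] using ih s
    | some t => simpa [pvTs] using ih (PySem.Set.add s t)

-- B's loop is a fold of insUnique over the same tuple list.
lemma foldB_eq (l : List (List (String × Int))) :
    ∀ acc : List (Int × Int),
      l.foldl (fun (acc : List (Int × Int)) h =>
        match PySem.Dict.get? ⟨h⟩ "row", PySem.Dict.get? ⟨h⟩ "col" with
        | some r, some c => insUnique (r, c) acc
        | _, _ => acc) acc
      = (pvTs l).foldl (fun a t => insUnique t a) acc := by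
  induction l with
  | nil => intro acc; rfl
  | cons h l ih =>
    intro acc
    simp only [List.foldl_cons, pvTs, List.filterMap_cons]
    cases hr : PySem.Dict.get? (⟨h⟩ : PySem.Dict String Int) "row" with
    | none =>
      have hk : pvKey? h = none := by simp [pvKey?, hr]
      simpa [pvTs, hr, hk] using ih acc
    | some r =>
      cases hc : PySem.Dict.get? (⟨h⟩ : PySem.Dict String Int) "col" with
      | none =>
        have hk : pvKey? h = none := by simp [pvKey?, hr, hc]
        simpa [pvTs, hr, hc, hk] using ih acc

      | some c =>
        have hk : pvKey? h = some (r, c) := by simp [pvKey?, hr, hc]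
        simpa [pvTs, hr, hc, hk] using ih (insUnique (r, c) acc)

lemma mem_insUnique (t x : Int × Int) :
    ∀ l : List (Int × Int), (x ∈ insUnique t l ↔ x = t ∨ x ∈ l) := by
  intro l
  induction l with
  | nil => simp [insUnique]
  | cons y ys ih =>
    simp only [insUnique]
    split_ifs with h1 h2
    · simp only [List.mem_cons, ih]
      tauto
    · subst h2
      simp [List.mem_cons]
    · simp [List.mem_cons]

lemma insUnique_pairwise (t : Int × Int) :
    ∀ l : List (Int × Int), l.Pairwise pltP → (insUnique t l).Pairwise pltP := by
  intro l
  induction l with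
  | nil => intro _; simp [insUnique]
  | cons y ys ih =>
    intro hp
    rw [List.pairwise_cons] at hp
    obtain ⟨hy, hys⟩ := hp
    simp only [insUnique]
    split_ifs with h1 h2
    · refine List.Pairwise.cons ?_ (ih hys)
      intro z hz
      rcases (mem_insUnique t z ys).mp hz with rfl | hz
      · exact h1
      · exact hy z hz
    · exact List.Pairwise.cons hy hys
    · refine List.Pairwise.cons ?_ (List.Pairwise.cons hy hys)
      intro z hz
      rcases List.mem_cons.mp hz with rfl | hz
      · exact eq_of_not_plt h1 h2
      · exact plt_trans (eq_of_not_plt h1 h2) (hy z hz)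

lemma foldl_insUnique_pairwise (ts : List (Int × Int)) :
    ∀ acc : List (Int × Int), acc.Pairwise pltP →
      (ts.foldl (fun a t => insUnique t a) acc).Pairwise pltP := by
  induction ts with
  | nil => intro acc h; exact h
  | cons t ts ih => intro acc h; exact ih _ (insUnique_pairwise t acc h)

lemma mem_foldl_insUnique (ts : List (Int × Int)) (x : Int × Int) :
    ∀ acc : List (Int × Int),
      (x ∈ ts.foldl (fun a t => insUnique t a) acc ↔ x ∈ acc ∨ x ∈ ts) := by
  induction ts with
  | nil => intro acc; simp
  | cons t ts ih =>
    intro acc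
    simp only [List.foldl_cons, ih, mem_insUnique, List.mem_cons]
    tauto

lemma nodup_of_pairwise_plt {l : List (Int × Int)} (h : l.Pairwise pltP) : l.Nodup :=
  h.imp (fun hpq => by rintro rfl; exact plt_irrefl _ hpq)

-- Two strictly sorted lists with the same elements are equal.
lemma eq_of_perm_of_pairwise_plt : ∀ (l1 l2 : List (Int × Int)),
    l1.Perm l2 → l1.Pairwise pltP → l2.Pairwise pltP → l1 = l2 := by
  intro l1
  induction l1 with
  | nil => intro l2 hp _ _; exact (hp.nil_eq).symm ▸ rfl
  | cons a t1 ih =>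
    intro l2 hp h1 h2
    cases l2 with
    | nil => exact absurd hp.symm (by simp)
    | cons b t2 =>
      rw [List.pairwise_cons] at h1 h2
      by_cases hab : a = b
      · subst hab
        have := ih t2 (hp.cons_inv) h1.2 h2.2
        rw [this]
      · exfalso
        have ha2 : a ∈ b :: t2 := hp.mem_iff.mp List.mem_cons_self
        have hb1 : b ∈ a :: t1 := hp.symm.mem_iff.mp List.mem_cons_self
        have hb1' : b ∈ t1 := by
          rcases List.mem_cons.mp hb1 with h | h
          · exact absurd h.symm hab
          · exact h
        have ha2' : a ∈ t2 := by
          rcases List.mem_cons.mp ha2 with h | h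
          · exact absurd h hab
          · exact h
        exact plt_asymm (h1.1 b hb1') (h2.1 a ha2')

lemma mem_sorted2 (xs : List (Int × Int)) (x : Int × Int) :
    x ∈ PySem.List.sorted2 xs Prod.fst Prod.snd ↔ x ∈ xs :=
  (PySem.List.sorted2_perm xs Prod.fst Prod.snd false).mem_iff

-- The heart: sorting the deduplicated set equals one-pass sorted-unique insertion.
lemma sorted_set_eq_foldl_insUnique (ts : List (Int × Int)) :
    PySem.List.sorted2 (PySem.Set.ofList ts) Prod.fst Prod.snd
      = ts.foldl (fun a t => insUnique t a) [] := by
  set L1 := PySem.List.sorted2 (PySem.Set.ofList ts) Prod.fst Prod.snd with hL1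
  set L2 := ts.foldl (fun a t => insUnique t a) [] with hL2
  have h1le : L1.Pairwise pleP := sorted2_pairwise _
  have h1nd : L1.Nodup :=
    ((PySem.List.sorted2_perm _ Prod.fst Prod.snd false).nodup_iff).mpr
      (PySem.Set.nodup_ofList ts)
  have h1lt : L1.Pairwise pltP :=
    (h1le.and h1nd).imp (fun ⟨hle, hne⟩ => plt_of_ple_ne hle hne)
  have h2lt : L2.Pairwise pltP := foldl_insUnique_pairwise ts [] List.Pairwise.nil
  have hmem : ∀ x, x ∈ L1 ↔ x ∈ L2 := by
    intro x
    rw [hL1, mem_sorted2, PySem.Set.mem_ofList, hL2, mem_foldl_insUnique]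
    simp
  have hperm : L1.Perm L2 :=
    (List.perm_ext_iff_of_nodup h1nd (nodup_of_pairwise_plt h2lt)).mpr hmem
  exact eq_of_perm_of_pairwise_plt L1 L2 hperm h1lt h2lt

-- ===== VERDICT (by name: the statement is the Claim_ definition above) =====
theorem extract_true_coords_from_headers_spec : Claim_equal_extract_true_coords_from_headers := by
  intro headers _
  show extract_true_coords_from_headers headers = extract_true_coords_from_headers_alt headers
  unfold extract_true_coords_from_headers extract_true_coords_from_headers_alt
  rw [foldA_eq, foldB_eq,
    show (pvTs headers).foldl PySem.Set.add PySem.Set.empty = PySem.Set.ofList (pvTs headers)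
      from (PySem.Set.ofList_eq_foldl (pvTs headers)).symm,
    sorted_set_eq_foldl_insUnique]
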